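-- pv_equiv track=rewrite | github.com/SEnteranewusername/randomcode | oeis.py | numberco
-- ===== SOURCE A (Python) =====
-- def numberco(string):
--     d=[]
--     for i in string:
--         n=str(ord(i))
--         z=0
--         for p in n:
--             z+=int(p)
--         d+=[z]
--     return(d)
-- ===== SOURCE B (Python) =====
-- def numberco(string):
--     d = []
--     for i in string:
--         m = ord(i)
--         z = 0
--         while m > 0:
--             z += m % 10
--             m //= 10
--         d.append(z)
--     return d
-- ===== Notes on version B (the rewrite author's own statement) =====
-- stated objective: faster
-- what changed: Each character's digit sum is computed arithmetically with %10 and //=10 on ord(i) instead of converting ord(i) to a decimal string and summing int() of its single-character substrings.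
import Mathlib
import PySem

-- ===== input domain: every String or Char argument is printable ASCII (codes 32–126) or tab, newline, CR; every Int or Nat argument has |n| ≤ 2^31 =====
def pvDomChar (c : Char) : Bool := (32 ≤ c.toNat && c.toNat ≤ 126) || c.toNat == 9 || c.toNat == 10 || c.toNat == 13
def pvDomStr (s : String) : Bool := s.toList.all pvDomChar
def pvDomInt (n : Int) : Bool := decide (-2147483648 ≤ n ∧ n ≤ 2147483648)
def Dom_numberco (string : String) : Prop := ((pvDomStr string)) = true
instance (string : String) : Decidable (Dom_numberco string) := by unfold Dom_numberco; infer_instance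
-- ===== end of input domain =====

-- B computes each character's digit sum arithmetically (%10, //10) instead of via str(ord(i)).

-- ===== PORT A =====
-- int(p) on a character of str(ord(i)): ord(i) ≥ 0, so its decimal string has only digit
-- characters and ofStr? is always `some`; .getD 0 is exact here (Python never raises).
def numberco (string : String) : List Int :=
  string.toList.foldl
    (fun d i =>
      let n := PySem.Int.toStr ((i.toNat : Int))
      let z := n.toList.foldl (fun z p => z + (PySem.Int.ofStr? (String.singleton p)).getD 0) 0
      d ++ [z])
    []

-- ===== PORT B =====
-- the `while m > 0:` loop of Source B
def pvWhileDigits (m z : Int) : Int :=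
  if _h : m > 0 then
    pvWhileDigits (PySem.Int.floordiv m 10) (z + PySem.Int.mod m 10)
  else z
termination_by m.toNat
decreasing_by
  rw [PySem.Int.floordiv_eq_ediv_of_pos (by omega)]
  omega

def numberco_alt (string : String) : List Int :=
  string.toList.foldl (fun d i => d ++ [pvWhileDigits ((i.toNat : Int)) 0]) []

-- ===== PRECONDITION & SPEC =====
def Spec_numberco (string : String) (out : List Int) : Prop := out = numberco_alt string
instance (string : String) (out : List Int) : Decidable (Spec_numberco string out) := by unfold Spec_numberco; infer_instance

-- ===== CLAIM (what is proved, stated in full; the proofs are below) =====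
def Claim_equal_numberco : Prop := ∀ (string : String), Dom_numberco string → Spec_numberco string (numberco string)

-- ===== LEMMAS AND PROOFS =====

-- per-character value of A
def pvPerA (i : Char) : Int :=
  (PySem.Int.toStr ((i.toNat : Int))).toList.foldl
    (fun z p => z + (PySem.Int.ofStr? (String.singleton p)).getD 0) 0

-- fuelled version of B's while-loop, kernel-reducible for `decide`
def pvDloop : Nat → Int → Int → Int
  | 0, _, z => z
  | f+1, m, z => if m > 0 then pvDloop f (PySem.Int.floordiv m 10) (z + PySem.Int.mod m 10) else z

theorem pvWhileDigits_eq_dloop (f : Nat) (m z : Int) (h : m.toNat ≤ f) :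
    pvWhileDigits m z = pvDloop f m z := by
  induction f generalizing m z with
  | zero =>
    rw [pvWhileDigits]
    simp [pvDloop]
    intro hm; omega
  | succ f ih =>
    rw [pvWhileDigits]
    by_cases hm : m > 0
    · rw [PySem.Int.floordiv_eq_ediv_of_pos (by omega)] at *
      simp only [pvDloop, hm, dif_pos, if_pos,
        PySem.Int.floordiv_eq_ediv_of_pos (show (0:Int) < 10 by omega)]
      exact ih _ _ (by omega)
    · simp [pvDloop, hm]

-- on the domain's character codes (≤ 126) the two per-character computations agree
theorem pvPer_eq_of_le (n : Nat) (h : n ≤ 126) :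
    pvPerA (Char.ofNat n) = pvWhileDigits ((Char.ofNat n).toNat : Int) 0 := by
  have hval : (⟨n, by omega⟩ : Fin 127).val = n := rfl
  have key : ∀ f : Fin 127, pvPerA (Char.ofNat f.val) = pvDloop 127 ((Char.ofNat f.val).toNat : Int) 0 := by decide
  have hchar : (Char.ofNat n).toNat = n := by
    rw [Char.toNat_ofNat, if_pos (Or.inl (show n < 0xd800 by omega))]
  rw [pvWhileDigits_eq_dloop 127 _ 0 (by omega)]
  simpa [hval] using key ⟨n, by omega⟩

theorem pvPerChar_eq (i : Char) (h : pvDomChar i = true) :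
    pvPerA i = pvWhileDigits ((i.toNat : Int)) 0 := by
  have hle : i.toNat ≤ 126 := by
    simp [pvDomChar] at h; omega
  have := pvPer_eq_of_le i.toNat hle
  rwa [Char.ofNat_toNat] at this

-- ===== VERDICT (by name: the statement is the Claim_ definition above) =====
theorem numberco_spec : Claim_equal_numberco := by
  intro s hdom
  unfold Spec_numberco numberco numberco_alt
  rw [PySem.List.foldl_append_singleton_eq_map, PySem.List.foldl_append_singleton_eq_map]
  apply List.map_congr_left
  intro i hi
  have hd : pvDomChar i = true := by
    have := (List.all_eq_true.mp hdom) i hi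
    exact this
  exact pvPerChar_eq i hd
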